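-- pv_equiv track=rewrite | github.com/ludaze/competitive_programming | Squid_Game/4th-week/expressive-words.py | helper
-- ===== SOURCE A (Python) =====
-- def helper(word,target):
--     l1,l2= 0,0
--     r1,r2 = 0,0
--
--     while l1 < len(word) and l2<len(target):
--         if word[l1] != target[l2]:
--             return 0
--         while r1<len(word) and word[l1]==word[r1]:
--                 r1+=1
--         len1 = r1-l1
--         while r2<len(target) and target[l2]==target[r2]:
--                 r2+=1
--         len2 = r2-l2
--         if len1 > len2:
--             return 0
--         if len1 != len2 and len2 < 3:
--             return 0
--         l1,l2 = r1,r2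
--     if l1==len(word) and l2==len(target):
--         return 1
--     return 0
-- ===== SOURCE B (Python) =====
-- def helper(word, target):
--     # Run-length encode both strings first, then compare the encodings pairwise.
--     def rle(s):
--         runs = []
--         prev = None
--         for ch in s:
--             if runs and ch == prev:
--                 runs[-1][1] += 1
--             else:
--                 runs.append([ch, 1])
--                 prev = ch
--         return runs
--
--     rw = rle(word)
--     rt = rle(target)
--     if len(rw) != len(rt):
--         return 0
--     for (c1, n1), (c2, n2) in zip(rw, rt):
--         if c1 != c2:
--             return 0
--         if n1 > n2:
--             return 0
--         if n1 != n2 and n2 < 3: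
--             return 0
--     return 1
-- ===== Notes on version B (the rewrite author's own statement) =====
-- stated objective: simpler
-- what changed: Replaces the four-pointer simultaneous scan with a decomposition: run-length encode each string once, then compare the two encodings pairwise with a single zip loop.
import Mathlib
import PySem

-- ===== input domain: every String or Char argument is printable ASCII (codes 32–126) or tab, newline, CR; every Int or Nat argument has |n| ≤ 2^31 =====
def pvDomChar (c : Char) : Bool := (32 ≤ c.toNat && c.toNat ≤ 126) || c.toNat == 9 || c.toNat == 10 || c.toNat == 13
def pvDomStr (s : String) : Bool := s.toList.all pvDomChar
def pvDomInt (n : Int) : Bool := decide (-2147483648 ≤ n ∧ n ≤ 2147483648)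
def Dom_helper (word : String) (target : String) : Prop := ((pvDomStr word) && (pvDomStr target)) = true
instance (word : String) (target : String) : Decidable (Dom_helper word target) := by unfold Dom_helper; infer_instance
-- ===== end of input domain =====

-- B compared with A: same 0/1 answer, computed by run-length encoding both strings first
-- and then one pairwise comparison loop (objective: simpler decomposition; not faster).

-- ===== PORT A =====
-- inner while: advance r while r < len(s) and c == s[r]  (c is the fixed s[l])
def advA (s : List Char) (c : Char) (r : Nat) : Nat :=
  if h : r < s.length ∧ c = s[r]! then advA s c (r + 1) else r
termination_by s.length - r

-- used by loopA's decreasing_by (stays above the claim block because the port cites it)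
theorem advA_ge (s : List Char) (c : Char) (r : Nat) : r ≤ advA s c r := by
  unfold advA
  split
  · exact le_trans (Nat.le_succ r) (advA_ge s c (r + 1))
  · exact le_refl r
termination_by s.length - r

-- the outer while loop of A (r1 = l1 and r2 = l2 hold at every loop head, so the
-- inner run scans start from l1 / l2)
def loopA (w t : List Char) (l1 l2 : Nat) : Int :=
  if hg : l1 < w.length ∧ l2 < t.length then
    if w[l1]! ≠ t[l2]! then 0
    else
      let r1 := advA w w[l1]! l1
      let len1 := r1 - l1
      let r2 := advA t t[l2]! l2
      let len2 := r2 - l2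
      if len1 > len2 then 0
      else if len1 ≠ len2 ∧ len2 < 3 then 0
      else loopA w t r1 r2
  else if l1 = w.length ∧ l2 = t.length then 1 else 0
termination_by w.length - l1
decreasing_by
  have h1 : l1 + 1 ≤ advA w w[l1]! (l1 + 1) := advA_ge w w[l1]! (l1 + 1)
  have hc : advA w w[l1]! l1 = advA w w[l1]! (l1 + 1) := by
    rw [advA, dif_pos ⟨hg.1, rfl⟩]
  omega

def helper (word : String) (target : String) : Int :=
  loopA word.toList target.toList 0 0

-- ===== PORT B =====
-- rle: fold over the characters; runs kept in reverse order (Python mutates runs[-1],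
-- here the head of the reversed list is rebuilt), reversed at the end
def rleStep (st : List (Char × Nat) × Option Char) (ch : Char) : List (Char × Nat) × Option Char :=
  if st.1 ≠ [] ∧ some ch = st.2 then
    match st.1 with
    | (c0, n) :: rest => ((c0, n + 1) :: rest, st.2)
    | [] => ((ch, 1) :: st.1, some ch)
  else ((ch, 1) :: st.1, some ch)

def rleB (s : List Char) : List (Char × Nat) :=
  (s.foldl rleStep ([], none)).1.reverse

-- the zip comparison loop
def checkLoop : List ((Char × Nat) × (Char × Nat)) → Int
  | [] => 1
  | ((c1, n1), (c2, n2)) :: rest =>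
    if c1 ≠ c2 then 0
    else if n1 > n2 then 0
    else if n1 ≠ n2 ∧ n2 < 3 then 0
    else checkLoop rest

def helper_alt (word : String) (target : String) : Int :=
  let rw := rleB word.toList
  let rt := rleB target.toList
  if rw.length ≠ rt.length then 0
  else checkLoop (rw.zip rt)

-- ===== PRECONDITION & SPEC =====
def Spec_helper (word : String) (target : String) (out : Int) : Prop := out = helper_alt word target
instance (word : String) (target : String) (out : Int) : Decidable (Spec_helper word target out) := by unfold Spec_helper; infer_instance

-- ===== CLAIM (what is proved, stated in full; the proofs are below) =====
def Claim_equal_helper : Prop := ∀ (word : String) (target : String), Dom_helper word target → Spec_helper word target (helper word target)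

-- ===== LEMMAS AND PROOFS =====

-- span-style run-length encoding: the common reference both ports are reduced to
def rleF (s : List Char) : List (Char × Nat) :=
  match s with
  | [] => []
  | c :: cs =>
    ((c, (cs.takeWhile (fun x => x == c)).length + 1)) :: rleF (cs.dropWhile (fun x => x == c))
termination_by s.length
decreasing_by
  simp only [List.length_cons]
  exact Nat.lt_succ_of_le (List.dropWhile_suffix _).sublist.length_le

-- structural pairwise comparison (what loopA computes on the RLEs)
def chk : List (Char × Nat) → List (Char × Nat) → Int
  | [], [] => 1
  | [], _ :: _ => 0
  | _ :: _, [] => 0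
  | (c1, n1) :: xs, (c2, n2) :: ys =>
    if c1 ≠ c2 then 0
    else if n1 > n2 then 0
    else if n1 ≠ n2 ∧ n2 < 3 then 0
    else chk xs ys

theorem chk_eq_check (xs ys : List (Char × Nat)) :
    chk xs ys = if xs.length ≠ ys.length then 0 else checkLoop (xs.zip ys) := by
  induction xs generalizing ys with
  | nil => cases ys <;> simp [chk, checkLoop]
  | cons p xs ih =>
    cases ys with
    | nil => simp [chk]
    | cons q ys =>
      obtain ⟨c1, n1⟩ := p; obtain ⟨c2, n2⟩ := q
      simp only [chk, List.zip_cons_cons, checkLoop, List.length_cons]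
      by_cases h1 : c1 ≠ c2
      · rw [if_pos h1, if_pos h1]; split <;> rfl
      · rw [if_neg h1, if_neg h1]
        by_cases h2 : n1 > n2
        · rw [if_pos h2, if_pos h2]; split <;> rfl
        · rw [if_neg h2, if_neg h2]
          by_cases h3 : n1 ≠ n2 ∧ n2 < 3
          · rw [if_pos h3, if_pos h3]; split <;> rfl
          · rw [if_neg h3, if_neg h3, ih]
            by_cases hl : xs.length = ys.length <;> simp [hl]

theorem dropWhile_eq_drop_len (p : Char → Bool) (l : List Char) :
    l.dropWhile p = l.drop (l.takeWhile p).length := by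
  induction l with
  | nil => rfl
  | cons x xs ih =>
    by_cases h : p x
    · simp [List.takeWhile_cons, h, ih]
    · simp [List.takeWhile_cons, h]

theorem advA_eq (s : List Char) (c : Char) (r : Nat) (hr : r ≤ s.length) :
    advA s c r = r + ((s.drop r).takeWhile (fun x => x == c)).length := by
  rw [advA]
  by_cases hlt : r < s.length
  · have hd : s.drop r = s[r] :: s.drop (r + 1) := List.drop_eq_getElem_cons hlt
    have h! : s[r]! = s[r] := getElem!_pos s r hlt
    by_cases hc : c = s[r]
    · rw [dif_pos ⟨hlt, by rw [h!]; exact hc⟩, advA_eq s c (r + 1) hlt, hd]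
      have hb : (s[r] == c) = true := by simp [hc.symm]
      simp only [List.takeWhile_cons, hb, if_true, List.length_cons]
      omega
    · rw [dif_neg (by rw [h!]; tauto), hd]
      have hb : (s[r] == c) = false := by simp; exact fun h => hc h.symm
      simp [List.takeWhile_cons, hb]
  · have hre : r = s.length := le_antisymm hr (not_lt.mp hlt)
    rw [dif_neg (by omega)]
    simp [hre]
termination_by s.length - r

theorem advA_le (s : List Char) (c : Char) (r : Nat) (hr : r ≤ s.length) :
    advA s c r ≤ s.length := by
  rw [advA_eq s c r hr]
  have h1 : ((s.drop r).takeWhile (fun x => x == c)).length ≤ (s.drop r).length :=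
    (List.takeWhile_prefix _).length_le
  simp at h1
  omega

-- main invariant: loopA on suffixes = chk on their RLEs
theorem loopA_eq_chk (w t : List Char) (l1 l2 : Nat)
    (h1 : l1 ≤ w.length) (h2 : l2 ≤ t.length) :
    loopA w t l1 l2 = chk (rleF (w.drop l1)) (rleF (t.drop l2)) := by
  rw [loopA]
  by_cases hg : l1 < w.length ∧ l2 < t.length
  · obtain ⟨hg1, hg2⟩ := hg
    have hdw : w.drop l1 = w[l1] :: w.drop (l1 + 1) := List.drop_eq_getElem_cons hg1
    have hdt : t.drop l2 = t[l2] :: t.drop (l2 + 1) := List.drop_eq_getElem_cons hg2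
    have hw! : w[l1]! = w[l1] := getElem!_pos w l1 hg1
    have ht! : t[l2]! = t[l2] := getElem!_pos t l2 hg2
    rw [dif_pos ⟨hg1, hg2⟩, hdw, hdt, rleF, rleF]
    by_cases hc : w[l1] = t[l2]
    case neg =>
      rw [if_pos (by rw [hw!, ht!]; exact hc)]
      simp only [chk]
      rw [if_pos (by simpa using hc)]
    case pos =>
      rw [if_neg (by rw [hw!, ht!]; simpa using hc)]
      set k1 := ((w.drop (l1 + 1)).takeWhile (fun x => x == w[l1])).length with hk1
      set k2 := ((t.drop (l2 + 1)).takeWhile (fun x => x == t[l2])).length with hk2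
      have hr1 : advA w w[l1]! l1 = l1 + 1 + k1 := by
        rw [hw!, advA_eq w w[l1] l1 (le_of_lt hg1), hdw]
        simp only [List.takeWhile_cons, BEq.rfl, if_true, List.length_cons, ← hk1]
        omega
      have hr2 : advA t t[l2]! l2 = l2 + 1 + k2 := by
        rw [ht!, advA_eq t t[l2] l2 (le_of_lt hg2), hdt]
        simp only [List.takeWhile_cons, BEq.rfl, if_true, List.length_cons, ← hk2]
        omega
      have hlen1 : advA w w[l1]! l1 - l1 = k1 + 1 := by omega
      have hlen2 : advA t t[l2]! l2 - l2 = k2 + 1 := by omega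
      have hdrop1 : w.drop (advA w w[l1]! l1) = (w.drop (l1 + 1)).dropWhile (fun x => x == w[l1]) := by
        rw [hr1, dropWhile_eq_drop_len, List.drop_drop, ← hk1]
      have hdrop2 : t.drop (advA t t[l2]! l2) = (t.drop (l2 + 1)).dropWhile (fun x => x == t[l2]) := by
        rw [hr2, dropWhile_eq_drop_len, List.drop_drop, ← hk2]
      have hle1 : advA w w[l1]! l1 ≤ w.length := by rw [hw!]; exact advA_le _ _ _ (le_of_lt hg1)
      have hle2 : advA t t[l2]! l2 ≤ t.length := by rw [ht!]; exact advA_le _ _ _ (le_of_lt hg2)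
      have hrec := loopA_eq_chk w t (advA w w[l1]! l1) (advA t t[l2]! l2) hle1 hle2
      simp only [chk]
      rw [if_neg (not_ne_iff.mpr hc), hlen1, hlen2]
      by_cases hb1 : k1 + 1 > k2 + 1
      · rw [if_pos hb1, if_pos hb1]
      · rw [if_neg hb1, if_neg hb1]
        by_cases hb2 : k1 + 1 ≠ k2 + 1 ∧ k2 + 1 < 3
        · rw [if_pos hb2, if_pos hb2]
        · rw [if_neg hb2, if_neg hb2, hrec, hdrop1, hdrop2, hc]
  · rw [dif_neg hg]
    simp only [not_and, not_lt] at hg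
    by_cases he1 : l1 = w.length
    · have hw : w.drop l1 = [] := by rw [he1, List.drop_length]
      by_cases he2 : l2 = t.length
      · have ht : t.drop l2 = [] := by rw [he2, List.drop_length]
        rw [if_pos ⟨he1, he2⟩, hw, ht]
        simp only [rleF, chk]
      · have hlt2 : l2 < t.length := lt_of_le_of_ne h2 he2
        have ht : t.drop l2 = t[l2] :: t.drop (l2 + 1) := List.drop_eq_getElem_cons hlt2
        rw [if_neg (by tauto), hw, ht]
        simp only [rleF, chk]
    · have hlt1 : l1 < w.length := lt_of_le_of_ne h1 he1
      have hl2 : l2 = t.length := le_antisymm h2 (hg hlt1)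
      have ht : t.drop l2 = [] := by rw [hl2, List.drop_length]
      have hw : w.drop l1 = w[l1] :: w.drop (l1 + 1) := List.drop_eq_getElem_cons hlt1
      rw [if_neg (by tauto), hw, ht]
      simp only [rleF, chk]
termination_by w.length - l1
decreasing_by
  have hadv : l1 + 1 ≤ advA w w[l1]! (l1 + 1) := advA_ge w w[l1]! (l1 + 1)
  have hstep : advA w w[l1]! l1 = advA w w[l1]! (l1 + 1) := by
    rw [advA, dif_pos ⟨hg1, rfl⟩]
  omega

-- rleB's fold (B's RLE) equals the span-style rleF
theorem foldl_rleStep_run (s : List Char) (c : Char) (n : Nat) (acc : List (Char × Nat)) :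
    (s.foldl rleStep ((c, n) :: acc, some c)).1.reverse =
      acc.reverse ++ (c, n + (s.takeWhile (fun x => x == c)).length) ::
        rleF (s.dropWhile (fun x => x == c)) := by
  induction s generalizing c n acc with
  | nil => simp [rleF]
  | cons x xs ih =>
    by_cases hx : x = c
    · subst hx
      have hstep : rleStep ((x, n) :: acc, some x) x = ((x, n + 1) :: acc, some x) := by
        simp [rleStep]
      simp only [List.foldl_cons, hstep, ih]
      have : (x == x) = true := by simp
      simp [this]
      omega
    · have hstep : rleStep ((c, n) :: acc, some c) x = ((x, 1) :: (c, n) :: acc, some x) := by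
        simp [rleStep, hx]
      have hxc : (x == c) = false := by simp [hx]
      simp only [List.foldl_cons, hstep, ih]
      simp [List.takeWhile_cons, hxc, List.dropWhile_cons, rleF]
      omega
theorem rleB_eq_rleF (s : List Char) : rleB s = rleF s := by
  cases s with
  | nil => simp [rleB, rleF]
  | cons x xs =>
    have hstep : rleStep ([], none) x = ([(x, 1)], some x) := by simp [rleStep]
    simp only [rleB, List.foldl_cons, hstep]
    rw [foldl_rleStep_run xs x 1 []]
    simp [rleF]
    omega

-- ===== VERDICT (by name: the statement is the Claim_ definition above) =====
theorem helper_spec : Claim_equal_helper := by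
  intro word target _
  show helper word target = helper_alt word target
  unfold helper helper_alt
  rw [rleB_eq_rleF, rleB_eq_rleF]
  have h := loopA_eq_chk word.toList target.toList 0 0 (Nat.zero_le _) (Nat.zero_le _)
  simp only [List.drop_zero] at h
  rw [h, chk_eq_check]
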